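-- pv_equiv track=rewrite | github.com/athul-santhosh/The-Daily-Byte | Correct Capitalization.py | correctCapitil_
-- ===== SOURCE A (Python) =====
-- def correctCapitil_(s):
-- 	first_capital = s[0].isupper()
-- 	capitals = 0
-- 	for i in s:
-- 		if i.isupper():
-- 			capitals += 1
-- 	if capitals == len(s):
-- 		return True
-- 	elif capitals == 1 and first_capital is True:
-- 		return True
-- 	elif capitals == 0:
-- 		return True
-- 	else:
-- 		return False
-- ===== SOURCE B (Python) =====
-- def correctCapitil_(s):
--     return all(c.isupper() for c in s) or not any(c.isupper() for c in s[1:])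
-- ===== Notes on version B (the rewrite author's own statement) =====
-- stated objective: simpler
-- what changed: Replaces A's capital counter plus three-way case analysis with two direct predicates: the string is all-uppercase, or no capital occurs after the first character.
import Mathlib
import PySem

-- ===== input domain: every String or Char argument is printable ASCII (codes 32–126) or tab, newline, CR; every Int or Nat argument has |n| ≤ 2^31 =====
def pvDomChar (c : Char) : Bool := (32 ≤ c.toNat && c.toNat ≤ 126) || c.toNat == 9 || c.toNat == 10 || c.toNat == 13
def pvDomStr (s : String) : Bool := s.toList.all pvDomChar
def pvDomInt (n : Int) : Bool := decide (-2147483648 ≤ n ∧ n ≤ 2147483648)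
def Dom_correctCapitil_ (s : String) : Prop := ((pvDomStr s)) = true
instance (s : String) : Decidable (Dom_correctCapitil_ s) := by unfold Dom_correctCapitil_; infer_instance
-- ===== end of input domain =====

-- B replaces A's capital counter + case analysis by two direct predicates: all-uppercase, or no capital after the first character (objective: simpler).

-- ===== PORT A =====
def correctCapitil_ (s : String) : Bool :=
  match PySem.Str.pyGet? s 0 with
  | none => false  -- s[0] raises IndexError in Python: excluded by Pre_
  | some c =>
    let first_capital := PySem.Chars.isupper c
    let capitals := s.toList.foldl (fun acc i => if PySem.Chars.isupper i then acc + 1 else acc) 0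
    if capitals = s.toList.length then true
    else if capitals = 1 ∧ first_capital = true then true
    else if capitals = 0 then true
    else false

-- ===== PORT B =====
def correctCapitil__alt (s : String) : Bool :=
  s.toList.all PySem.Chars.isupper || !((PySem.Str.slice s (some 1) none).toList.any PySem.Chars.isupper)

-- ===== PRECONDITION & SPEC =====
-- Pre_ excludes only the empty string, on which A raises IndexError at s[0].
def Pre_correctCapitil_ (s : String) : Prop := s ≠ ""
instance (s : String) : Decidable (Pre_correctCapitil_ s) := by unfold Pre_correctCapitil_; infer_instance
def pvWitness_correctCapitil_ : String := "Hello"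

def Spec_correctCapitil_ (s : String) (out : Bool) : Prop := out = correctCapitil__alt s
instance (s : String) (out : Bool) : Decidable (Spec_correctCapitil_ s out) := by unfold Spec_correctCapitil_; infer_instance

-- ===== CLAIM (what is proved, stated in full; the proofs are below) =====
def Claim_equal_correctCapitil_ : Prop := ∀ (s : String), Dom_correctCapitil_ s → Pre_correctCapitil_ s → Spec_correctCapitil_ s (correctCapitil_ s)

-- ===== LEMMAS AND PROOFS =====

theorem foldl_count_eq (p : Char → Bool) (l : List Char) (n : Nat) :
    l.foldl (fun acc i => if p i then acc + 1 else acc) n = n + l.countP p := by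
  induction l generalizing n with
  | nil => simp
  | cons c t ih => by_cases h : p c <;> simp [List.countP_cons, h, ih] <;> omega

theorem core_lemma (p : Char → Bool) (c : Char) (t : List Char) :
    (let capitals := (c :: t).foldl (fun acc i => if p i then acc + 1 else acc) 0
     if capitals = (c :: t).length then true
     else if capitals = 1 ∧ p c = true then true
     else if capitals = 0 then true
     else false)
    = ((c :: t).all p || !(t.any p)) := by
  simp only [foldl_count_eq, Nat.zero_add]
  by_cases hall : (c :: t).all p = true
  · have h : (c :: t).countP p = (c :: t).length :=
      List.countP_eq_length.mpr (List.all_eq_true.mp hall)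
    simp [h, hall]
  · have hlt : (c :: t).countP p ≠ (c :: t).length := fun h =>
      hall (List.all_eq_true.mpr (List.countP_eq_length.mp h))
    rw [eq_false_of_ne_true hall, Bool.false_or, if_neg hlt]
    by_cases hany : t.any p = true
    · have hc1 : 0 < t.countP p :=
        List.countP_pos_iff.mpr (by simpa [List.any_eq_true] using hany)
      rw [hany, Bool.not_true]
      by_cases hpc : p c = true
      · have h2 : 2 ≤ (c :: t).countP p := by rw [List.countP_cons, if_pos hpc]; omega
        rw [if_neg (fun h => by omega), if_neg (by omega)]
      · rw [if_neg (fun h => hpc h.2), if_neg (by rw [List.countP_cons, if_neg hpc]; omega)]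
    · have ht0 : t.countP p = 0 := by
        rw [List.countP_eq_zero]; intro a ha
        exact List.any_eq_false.mp (eq_false_of_ne_true hany) a ha
      rw [eq_false_of_ne_true hany, Bool.not_false]
      by_cases hpc : p c = true
      · rw [if_pos ⟨by rw [List.countP_cons, if_pos hpc, ht0], hpc⟩]
      · rw [if_neg (fun h => hpc h.2), if_pos (by rw [List.countP_cons, if_neg hpc, ht0])]

-- ===== VERDICT (by name: the statement is the Claim_ definition above) =====
theorem correctCapitil__spec : Claim_equal_correctCapitil_ := by
  intro s _ hpre
  unfold Spec_correctCapitil_ correctCapitil_ correctCapitil__alt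
  have hne : s.toList ≠ [] := fun h => hpre (String.toList_eq_nil_iff.mp h)
  obtain ⟨c, t, hct⟩ := List.exists_cons_of_ne_nil hne
  have hget : PySem.Str.pyGet? s 0 = some c := by
    have : PySem.Str.pyGet? s (0 : Int) = s.toList[(0:Nat)]? := by
      simpa using PySem.Str.pyGet?_natCast s 0
    rw [this, hct]; rfl
  have hslice : (PySem.Str.slice s (some 1) none).toList = t := by
    rw [PySem.Str.toList_slice, PySem.Chars.slice_eq_listSlice, PySem.List.slice_from_one, hct]
    rfl
  rw [hget, hslice, hct]
  exact core_lemma PySem.Chars.isupper c t
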